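-- pv_equiv track=rewrite | github.com/fladi/tinycss2 | tinycss2/tokenizer.py | _consume_unicode_range
-- ===== SOURCE A (Python) =====
-- def _consume_unicode_range(css, pos):
--     """Return (range, new_pos)
--
--     The given pos is assume to be just after the '+' of 'U+' or 'u+'.
--
--     """
--     # http://dev.w3.org/csswg/css-syntax/#consume-a-unicode-range-token
--     length = len(css)
--     start_pos = pos
--     max_pos = min(pos + 6, length)
--     while pos < max_pos and css[pos] in '0123456789abcdefABCDEF':
--         pos += 1
--     start = css[start_pos:pos]
--
--     start_pos = pos
--     # Same max_pos as before: total of hex digits and question marks <= 6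
--     while pos < max_pos and css[pos] == '?':
--         pos += 1
--     question_marks = pos - start_pos
--
--     if question_marks:
--         end = start + 'F' * question_marks
--         start = start + '0' * question_marks
--     elif (pos + 1 < length and css[pos] == '-'
--             and css[pos + 1] in '0123456789abcdefABCDEF'):
--         pos += 1
--         start_pos = pos
--         max_pos = min(pos + 6, length)
--         while pos < max_pos and css[pos] in '0123456789abcdefABCDEF':
--             pos += 1
--         end = css[start_pos:pos]
--     else:
--         end = start
--     return int(start, 16), int(end, 16), pos
-- ===== SOURCE B (Python) =====
-- import re
--
-- _HEX_AND_MARKS = re.compile(r'([0-9a-fA-F]*)(\?*)')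
-- _HEX_RUN = re.compile(r'[0-9a-fA-F]*')
--
--
-- def _consume_unicode_range(css, pos):
--     """Return (range, new_pos)
--
--     The given pos is assume to be just after the '+' of 'U+' or 'u+'.
--
--     """
--     # One regex match on a fixed 6-char window gives the hex digits and the
--     # question marks together; the window size enforces the combined <= 6 limit.
--     match = _HEX_AND_MARKS.match(css[pos:pos + 6])
--     start, marks = match.group(1), match.group(2)
--     pos += match.end()
--     if marks:
--         return (int(start + '0' * len(marks), 16),
--                 int(start + 'F' * len(marks), 16), pos)
--     if (pos + 1 < len(css) and css[pos] == '-'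
--             and css[pos + 1] in '0123456789abcdefABCDEF'):
--         end = _HEX_RUN.match(css[pos + 1:pos + 7]).group()
--         return int(start, 16), int(end, 16), pos + 1 + len(end)
--     return int(start, 16), int(start, 16), pos
-- ===== Notes on version B (the rewrite author's own statement) =====
-- stated objective: idiomatic
-- what changed: Replaces A's two bounded index/while scans over the full string (with a shared max_pos cap) by a single precompiled regex match '([0-9a-fA-F]*)(\?*)' on a fixed 6-char window slice, which yields the hex digits and the question-mark count in one call (the window size enforces the combined <=6 limit); the '-' branch likewise regex-matches '[0-9a-fA-F]*' on a pre-sliced 6-char tail instead of index-stepping with a recomputed max_pos.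
-- outside the precondition, e.g. on _consume_unicode_range('ab', -1): A returns (11, 11, 2), B returns (11, 11, 0); on _consume_unicode_range('ab', -2): A returns (171, 171, 2), B returns (171, 171, 0)
import Mathlib
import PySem

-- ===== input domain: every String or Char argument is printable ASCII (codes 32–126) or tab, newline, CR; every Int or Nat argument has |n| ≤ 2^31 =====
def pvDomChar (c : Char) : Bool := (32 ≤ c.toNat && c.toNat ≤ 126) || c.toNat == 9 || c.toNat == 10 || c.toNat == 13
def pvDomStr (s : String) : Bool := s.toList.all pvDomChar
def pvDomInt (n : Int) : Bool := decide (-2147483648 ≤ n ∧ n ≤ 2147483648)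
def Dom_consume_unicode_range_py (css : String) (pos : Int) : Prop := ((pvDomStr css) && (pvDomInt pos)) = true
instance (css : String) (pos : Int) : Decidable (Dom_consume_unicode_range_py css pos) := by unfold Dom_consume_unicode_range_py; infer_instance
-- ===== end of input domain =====

-- B replaces A's two index/while scans (with their shared max_pos cap) by one
-- regex match on a fixed 6-char window (ported here as takeWhile passes on the
-- window); equal return values on Pre_, similar cost.

-- ===== PORT A =====
-- shared helpers: the hex-character class and int(s, 16).
def pvHexChars : List Char := "0123456789abcdefABCDEF".toList
def pvIsHex (c : Char) : Bool := pvHexChars.contains c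
-- int(s, 16): exact for the nonempty all-hex-digit strings both programs build
-- inside Pre_ (no sign/whitespace/prefix cases can occur there).
def pvHexDigit (c : Char) : Int :=
  if '0' ≤ c ∧ c ≤ '9' then (c.toNat : Int) - 48
  else if 'a' ≤ c ∧ c ≤ 'f' then (c.toNat : Int) - 87
  else if 'A' ≤ c ∧ c ≤ 'F' then (c.toNat : Int) - 55
  else 0
def pvHexVal (s : List Char) : Int := s.foldl (fun a c => 16 * a + pvHexDigit c) 0

-- `while pos < max_pos and p(css[pos]): pos += 1`, fuel = (max_pos - pos).toNat
def pvScanA (l : List Char) (p : Char → Bool) (maxPos : Int) : Nat → Int → Int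
  | 0, pos => pos
  | Nat.succ n, pos =>
    if pos < maxPos ∧ (PySem.List.pyGet? l pos).elim false p = true
    then pvScanA l p maxPos n (pos + 1)
    else pos

def pvRangeA (l : List Char) (pos : Int) : Int × Int × Int :=
  let length : Int := l.length
  let max_pos := min (pos + 6) length
  let pos1 := pvScanA l pvIsHex max_pos (max_pos - pos).toNat pos
  let start := PySem.List.slice l (some pos) (some pos1)
  let pos2 := pvScanA l (fun c => c == '?') max_pos (max_pos - pos1).toNat pos1
  let qm := pos2 - pos1
  if qm ≠ 0 then
    (pvHexVal (start ++ List.replicate qm.toNat '0'),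
     pvHexVal (start ++ List.replicate qm.toNat 'F'), pos2)
  else if pos2 + 1 < length ∧ (PySem.List.pyGet? l pos2).elim false (fun c => c == '-') = true
        ∧ (PySem.List.pyGet? l (pos2 + 1)).elim false pvIsHex = true then
    let pos3 := pos2 + 1
    let max2 := min (pos3 + 6) length
    let pos4 := pvScanA l pvIsHex max2 (max2 - pos3).toNat pos3
    (pvHexVal start, pvHexVal (PySem.List.slice l (some pos3) (some pos4)), pos4)
  else (pvHexVal start, pvHexVal start, pos2)

def consume_unicode_range_py (css : String) (pos : Int) : Int × Int × Int :=
  pvRangeA css.toList pos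

-- ===== PORT B =====
-- the regex match of '([0-9a-fA-F]*)(\?*)' on the window: group(1) is the
-- leading hex run, group(2) the following '?' run — ported as takeWhile passes.
def pvRangeB (l : List Char) (pos : Int) : Int × Int × Int :=
  let window := PySem.List.slice l (some pos) (some (pos + 6))
  let start := window.takeWhile pvIsHex
  let marks := (window.drop start.length).takeWhile (fun c => c == '?')
  let p2 := pos + start.length + marks.length
  if marks.length ≠ 0 then
    (pvHexVal (start ++ List.replicate marks.length '0'),
     pvHexVal (start ++ List.replicate marks.length 'F'), p2)
  else if p2 + 1 < (l.length : Int) ∧ (PySem.List.pyGet? l p2).elim false (fun c => c == '-') = true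
        ∧ (PySem.List.pyGet? l (p2 + 1)).elim false pvIsHex = true then
    -- the '[0-9a-fA-F]*' match on the 6-char tail window
    let endv := (PySem.List.slice l (some (p2 + 1)) (some (p2 + 7))).takeWhile pvIsHex
    (pvHexVal start, pvHexVal endv, p2 + 1 + (endv.length : Int))
  else (pvHexVal start, pvHexVal start, p2)

def consume_unicode_range_py_alt (css : String) (pos : Int) : Int × Int × Int :=
  pvRangeB css.toList pos

-- ===== PRECONDITION & SPEC =====
-- Pre_ admits every in-range nonnegative pos whose character is a hex digit or
-- '?' — exactly where A returns normally for a cursor just past 'U+'.  It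
-- excludes (a) inputs where A raises ValueError via int('', 16) (pos at/past the
-- end, or a character that is neither hex nor '?'), and (b) negative pos, where
-- A sometimes raises and otherwise returns an accidental value: Python's
-- negative-index wraparound drives the char loops while the start/end slices
-- normalize separately, so the returned range need not cover the consumed
-- characters — a corner artefact no caller (pos is a cursor) could rely on.
def Pre_consume_unicode_range_py (css : String) (pos : Int) : Prop :=
  0 ≤ pos ∧ pos < (css.toList.length : Int) ∧
    ((PySem.List.pyGet? css.toList pos).elim false
      (fun c => pvIsHex c || c == '?')) = true
instance (css : String) (pos : Int) : Decidable (Pre_consume_unicode_range_py css pos) := by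
  unfold Pre_consume_unicode_range_py; infer_instance

def pvWitness_consume_unicode_range_py : String × Int := ("1f-2a", 0)

def Spec_consume_unicode_range_py (css : String) (pos : Int) (out : Int × Int × Int) : Prop := out = consume_unicode_range_py_alt css pos
instance (css : String) (pos : Int) (out : Int × Int × Int) : Decidable (Spec_consume_unicode_range_py css pos out) := by unfold Spec_consume_unicode_range_py; infer_instance

-- ===== CLAIM (what is proved, stated in full; the proofs are below) =====
def Claim_equal_consume_unicode_range_py : Prop := ∀ (css : String) (pos : Int), Dom_consume_unicode_range_py css pos → Pre_consume_unicode_range_py css pos → Spec_consume_unicode_range_py css pos (consume_unicode_range_py css pos)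

-- ===== LEMMAS AND PROOFS =====

-- number of leading characters of xs satisfying p
def pvLead (p : Char → Bool) : List Char → Nat
  | [] => 0
  | c :: r => if p c then pvLead p r + 1 else 0

-- pvRangeB re-expressed through pvLead/take (the bridge between the two ports)
def pvRangeBold (l : List Char) (pos : Int) : Int × Int × Int :=
  let window := PySem.List.slice l (some pos) (some (pos + 6))
  let L := pvLead pvIsHex window
  let Q := pvLead (fun c => c == '?') (window.drop L)
  let start := window.take L
  let p2 := pos + (L : Int) + (Q : Int)
  if Q ≠ 0 then
    (pvHexVal (start ++ List.replicate Q '0'),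
     pvHexVal (start ++ List.replicate Q 'F'), p2)
  else if p2 + 1 < (l.length : Int) ∧ (PySem.List.pyGet? l p2).elim false (fun c => c == '-') = true
        ∧ (PySem.List.pyGet? l (p2 + 1)).elim false pvIsHex = true then
    let tail := PySem.List.slice l (some (p2 + 1)) (some (p2 + 7))
    let ne := pvLead pvIsHex tail
    (pvHexVal start, pvHexVal (tail.take ne), p2 + 1 + (ne : Int))
  else (pvHexVal start, pvHexVal start, p2)

lemma pvLead_le (p : Char → Bool) (xs : List Char) : pvLead p xs ≤ xs.length := by
  induction xs with
  | nil => simp [pvLead]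
  | cons c r ih => simp only [pvLead, List.length_cons]; split <;> omega

lemma pvLead_eq_takeWhile (p : Char → Bool) (xs : List Char) :
    pvLead p xs = (xs.takeWhile p).length := by
  induction xs with
  | nil => rfl
  | cons c r ih =>
    by_cases h : p c = true <;> simp [pvLead, List.takeWhile, h, ih]

lemma take_len_takeWhile (p : Char → Bool) (xs : List Char) :
    xs.take ((xs.takeWhile p).length) = xs.takeWhile p := by
  induction xs with
  | nil => rfl
  | cons c r ih =>
    by_cases h : p c = true <;> simp [List.takeWhile, h, ih]

lemma pvRangeBold_eq (l : List Char) (pos : Int) : pvRangeBold l pos = pvRangeB l pos := by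
  rw [pvRangeBold, pvRangeB]
  simp only [pvLead_eq_takeWhile, take_len_takeWhile]

lemma pvScanA_eq (n : Nat) (l : List Char) (p : Char → Bool) (m i : Int)
    (h0 : 0 ≤ i) (hm : m ≤ (l.length : Int)) (hn : (m - i).toNat = n) :
    pvScanA l p m n i = i + (pvLead p ((l.drop i.toNat).take n) : Int) := by
  induction n generalizing i with
  | zero => simp [pvScanA, pvLead]
  | succ k ih =>
    have him : i < m := by omega
    have hil : i.toNat < l.length := by omega
    have hdrop := List.drop_eq_getElem_cons hil
    rw [pvScanA, PySem.List.pyGet?_eq_some_getElem l h0 (by omega)]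
    simp only [Option.elim]
    by_cases hp : p l[i.toNat] = true
    · rw [if_pos ⟨him, hp⟩, ih (i + 1) (by omega) (by omega)]
      rw [hdrop]
      have : (i + 1).toNat = i.toNat + 1 := by omega
      rw [this, List.take_succ_cons]
      simp only [pvLead, hp, if_pos]
      push_cast; ring
    · rw [if_neg (by simp [hp]), hdrop, List.take_succ_cons]
      simp [pvLead, hp]

-- the fuel of A's capped scan never truncates the 6-char window
lemma scan_take (l : List Char) (i : Int) (h0 : 0 ≤ i) :
    (l.drop i.toNat).take ((min (i + 6) (l.length : Int)) - i).toNat = (l.drop i.toNat).take 6 := by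
  have hlen : (l.drop i.toNat).length = l.length - i.toNat := by simp
  have h : ((min (i + 6) (l.length : Int)) - i).toNat = min 6 (l.drop i.toNat).length := by
    rw [hlen]; omega
  rw [h]; exact List.take_eq_take_min.symm

-- re-taking a leading count out of the 6-char window is taking it from the list
lemma take_lead (X : List Char) (k : Nat) (hk : k ≤ (X.take 6).length) :
    (X.take 6).take k = X.take k := by
  rw [List.take_take]
  congr 1
  have : (X.take 6).length ≤ 6 := by simp
  omega

lemma pvRange_eq (l : List Char) (pos : Int) (h0 : 0 ≤ pos) :
    pvRangeA l pos = pvRangeBold l pos := by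
  have hm2 : min (pos + 6) (l.length : Int) ≤ (l.length : Int) := min_le_right _ _
  rw [pvRangeA, pvRangeBold]
  -- the window
  have hw : PySem.List.slice l (some pos) (some (pos + 6)) = (l.drop pos.toNat).take 6 := by
    rw [PySem.List.slice_toNat l h0 (by omega)]
    congr 1
    omega
  rw [hw]
  -- A's first scan
  rw [pvScanA_eq _ l pvIsHex _ pos h0 hm2 rfl, scan_take l pos h0]
  have hLh := pvLead_le pvIsHex ((l.drop pos.toNat).take 6)
  have hw6 : ((l.drop pos.toNat).take 6).length ≤ 6 := by simp
  -- A's second scan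
  rw [pvScanA_eq _ l (fun c => c == '?') _ _ (by omega) hm2 rfl]
  have hdropw : (l.drop (pos + (pvLead pvIsHex ((l.drop pos.toNat).take 6) : Int)).toNat).take
        ((min (pos + 6) (l.length : Int)) - (pos + (pvLead pvIsHex ((l.drop pos.toNat).take 6) : Int))).toNat
      = ((l.drop pos.toNat).take 6).drop (pvLead pvIsHex ((l.drop pos.toNat).take 6)) := by
    have he : (pos + (pvLead pvIsHex ((l.drop pos.toNat).take 6) : Int)).toNat
        = pos.toNat + pvLead pvIsHex ((l.drop pos.toNat).take 6) := by omega
    rw [he, ← List.drop_drop, List.drop_take]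
    have hlen2 : ((l.drop pos.toNat).drop (pvLead pvIsHex ((l.drop pos.toNat).take 6))).length
        = l.length - pos.toNat - pvLead pvIsHex ((l.drop pos.toNat).take 6) := by simp; omega
    have h : ((min (pos + 6) (l.length : Int)) - (pos + (pvLead pvIsHex ((l.drop pos.toNat).take 6) : Int))).toNat
        = min (6 - pvLead pvIsHex ((l.drop pos.toNat).take 6))
            ((l.drop pos.toNat).drop (pvLead pvIsHex ((l.drop pos.toNat).take 6))).length := by
      rw [hlen2]; omega
    rw [h]; exact List.take_eq_take_min.symm
  rw [hdropw]
  -- the question-mark count and the final cursor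
  have hq : pos + (pvLead pvIsHex ((l.drop pos.toNat).take 6) : Int)
        + (pvLead (fun c => c == '?') (((l.drop pos.toNat).take 6).drop (pvLead pvIsHex ((l.drop pos.toNat).take 6))) : Int)
        - (pos + (pvLead pvIsHex ((l.drop pos.toNat).take 6) : Int))
      = (pvLead (fun c => c == '?') (((l.drop pos.toNat).take 6).drop (pvLead pvIsHex ((l.drop pos.toNat).take 6))) : Int) := by
    ring
  rw [hq]
  -- the start slice
  have hstart : PySem.List.slice l (some pos) (some (pos + (pvLead pvIsHex ((l.drop pos.toNat).take 6) : Int)))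
      = ((l.drop pos.toNat).take 6).take (pvLead pvIsHex ((l.drop pos.toNat).take 6)) := by
    rw [PySem.List.slice_toNat l h0 (by omega), take_lead _ _ hLh]
    congr 1
    omega
  rw [hstart]
  simp only [Int.toNat_natCast, ne_eq, Nat.cast_eq_zero]
  set L := pvLead pvIsHex ((l.drop pos.toNat).take 6) with hLdef
  set Q := pvLead (fun c => c == '?') (((l.drop pos.toNat).take 6).drop L) with hQdef
  -- remaining difference: the '-' branch
  split_ifs with hqz hbr
  · -- second hex run after '-'
    rw [pvScanA_eq _ l pvIsHex _ _ (by omega) (min_le_right _ _) rfl,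
        scan_take l _ (by omega)]
    have htail : PySem.List.slice l (some (pos + (L : Int) + (Q : Int) + 1))
          (some (pos + (L : Int) + (Q : Int) + 7))
        = (l.drop (pos + (L : Int) + (Q : Int) + 1).toNat).take 6 := by
      rw [PySem.List.slice_toNat l (by omega) (by omega)]
      congr 1
      omega
    rw [htail]
    have hend : PySem.List.slice l (some (pos + (L : Int) + (Q : Int) + 1))
          (some (pos + (L : Int) + (Q : Int) + 1 +
            (pvLead pvIsHex ((l.drop (pos + (L : Int) + (Q : Int) + 1).toNat).take 6) : Int)))
        = ((l.drop (pos + (L : Int) + (Q : Int) + 1).toNat).take 6).take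
            (pvLead pvIsHex ((l.drop (pos + (L : Int) + (Q : Int) + 1).toNat).take 6)) := by
      rw [PySem.List.slice_toNat l (by omega) (by omega)]
      rw [show (pos + (L : Int) + (Q : Int) + 1 +
            (pvLead pvIsHex ((l.drop (pos + (L : Int) + (Q : Int) + 1).toNat).take 6) : Int)).toNat
          - (pos + (L : Int) + (Q : Int) + 1).toNat
          = pvLead pvIsHex ((l.drop (pos + (L : Int) + (Q : Int) + 1).toNat).take 6) from by omega]
      exact (take_lead _ _ (pvLead_le _ _)).symm
    rw [hend]
  · rfl
  · rfl

-- ===== VERDICT (by name: the statement is the Claim_ definition above) =====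
theorem consume_unicode_range_py_spec : Claim_equal_consume_unicode_range_py := by
  intro css pos _ hpre
  unfold Spec_consume_unicode_range_py consume_unicode_range_py consume_unicode_range_py_alt
  rw [← pvRangeBold_eq]
  exact pvRange_eq css.toList pos hpre.1
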